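-- pv_equiv track=rewrite | github.com/mukeshkdangi/hw_spring19 | CSCI 531 Applied Crypto Graphy/CSCI531_HW_3/crypt.py | get_blocks_from_text
-- ===== SOURCE A (Python) =====
-- DEFAULT_BLOCK_SIZE = 128
--
-- RSA_BYTE_SIZE = 256
--
-- DEFAULT_ENCODEING_FORMAT='utf-8'
--
-- def get_blocks_from_text(message, default_block_size=DEFAULT_BLOCK_SIZE):
--     message_bytes = str(message).encode(DEFAULT_ENCODEING_FORMAT)
--     block_ints = []
--     for block_start in range(0, len(message_bytes), default_block_size):
--         block_int = 0
--         for i in range(block_start, min(block_start + default_block_size, len(message_bytes))):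
--             block_int += message_bytes[i] * (RSA_BYTE_SIZE ** (i % default_block_size))
--         block_ints.append(block_int)
--     return block_ints
-- ===== SOURCE B (Python) =====
-- DEFAULT_BLOCK_SIZE = 128
--
-- DEFAULT_ENCODEING_FORMAT = 'utf-8'
--
--
-- def _block_value(chunk):
--     # little-endian base-256 value of a byte chunk, by Horner's method
--     value = 0
--     for byte in reversed(chunk):
--         value = value * 256 + byte
--     return value
--
--
-- def get_blocks_from_text(message, default_block_size=DEFAULT_BLOCK_SIZE):
--     data = str(message).encode(DEFAULT_ENCODEING_FORMAT)
--     return [_block_value(data[start:start + default_block_size])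
--             for start in range(0, len(data), default_block_size)]
-- ===== Notes on version B (the rewrite author's own statement) =====
-- stated objective: alternative
-- what changed: B slices the byte string into chunks and evaluates each chunk's little-endian value by Horner's method over the reversed chunk (value = value*256 + byte), replacing A's indexed inner loop that sums byte * 256**(i % block_size) big-integer power terms.
import Mathlib
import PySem

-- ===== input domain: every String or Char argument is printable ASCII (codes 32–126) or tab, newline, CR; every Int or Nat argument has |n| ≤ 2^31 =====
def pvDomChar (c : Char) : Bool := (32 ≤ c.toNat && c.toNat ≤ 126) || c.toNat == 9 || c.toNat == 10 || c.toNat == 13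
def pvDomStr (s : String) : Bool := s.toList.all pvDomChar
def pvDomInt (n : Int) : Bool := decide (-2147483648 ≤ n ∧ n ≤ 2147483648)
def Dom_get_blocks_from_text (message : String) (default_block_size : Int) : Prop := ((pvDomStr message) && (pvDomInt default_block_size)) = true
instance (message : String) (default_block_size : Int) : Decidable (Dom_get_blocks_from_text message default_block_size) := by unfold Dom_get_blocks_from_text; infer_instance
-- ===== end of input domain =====

-- B slices the byte string into chunks and evaluates each chunk by Horner's method over the
-- reversed chunk (value = value*256 + byte), instead of A's indexed power-sum inner loop.

-- ===== PORT A =====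
-- message.encode('utf-8') as byte values; exact on the ASCII domain (codes ≤ 126 encode to themselves)
def pvBytes (message : String) : List Int := message.toList.map (fun c => (c.toNat : Int))

def get_blocks_from_text (message : String) (default_block_size : Int) : List Int :=
  let message_bytes := pvBytes message
  let n : Int := message_bytes.length
  (PySem.List.pyRange 0 n default_block_size).foldl
    (fun block_ints block_start =>
      block_ints ++
        [(PySem.List.pyRange block_start (min (block_start + default_block_size) n) 1).foldl
          (fun block_int i =>
            block_int + (PySem.List.pyGetD message_bytes i 0) *
              (256 : Int) ^ (PySem.Int.mod i default_block_size).toNat)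
          0])
    []

-- ===== PORT B =====
def pvBlockValue (chunk : List Int) : Int :=
  chunk.reverse.foldl (fun value byte => value * 256 + byte) 0

def get_blocks_from_text_alt (message : String) (default_block_size : Int) : List Int :=
  let data := pvBytes message
  (PySem.List.pyRange 0 data.length default_block_size).map
    (fun start =>
      pvBlockValue (PySem.List.slice data (some start) (some (start + default_block_size))))

-- ===== PRECONDITION & SPEC =====
-- Pre_ excludes default_block_size = 0, where Python's range(0, n, 0) raises ValueError (in both A and B).
def Pre_get_blocks_from_text (message : String) (default_block_size : Int) : Prop :=
  default_block_size ≠ 0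
instance (message : String) (default_block_size : Int) : Decidable (Pre_get_blocks_from_text message default_block_size) := by unfold Pre_get_blocks_from_text; infer_instance

def pvWitness_get_blocks_from_text : String × Int := ("abcde", 2)

def Spec_get_blocks_from_text (message : String) (default_block_size : Int) (out : List Int) : Prop := out = get_blocks_from_text_alt message default_block_size
instance (message : String) (default_block_size : Int) (out : List Int) : Decidable (Spec_get_blocks_from_text message default_block_size out) := by unfold Spec_get_blocks_from_text; infer_instance

-- ===== CLAIM (what is proved, stated in full; the proofs are below) =====
def Claim_equal_get_blocks_from_text : Prop := ∀ (message : String) (default_block_size : Int), Dom_get_blocks_from_text message default_block_size → Pre_get_blocks_from_text message default_block_size → Spec_get_blocks_from_text message default_block_size (get_blocks_from_text message default_block_size)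

-- ===== LEMMAS AND PROOFS =====

-- For a negative step (and a nonnegative stop), range(0, n, s) is empty.
theorem pyRange_zero_neg_step (n s : Int) (hn : 0 ≤ n) (hs : s < 0) :
    PySem.List.pyRange 0 n s = [] := by
  unfold PySem.List.pyRange
  have h0 : ¬ s = 0 := by omega
  have h1 : ¬ 0 < s := by omega
  have h2 : ¬ n < 0 := by omega
  simp [h0, h1, h2]

-- Horner over a reversed integer range equals the power-sum fold, generalized over the accumulator.
theorem horner_key (v : Int → Int) (b : Int) (m : Nat) (a : Int) :
    (PySem.List.pyRange b (b + m) 1).reverse.foldl (fun acc i => acc * 256 + v i) a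
      = a * 256 ^ m +
        (PySem.List.pyRange b (b + m) 1).foldl
          (fun bi i => bi + v i * 256 ^ (i - b).toNat) 0 := by
  induction m generalizing a with
  | zero =>
      simp
  | succ m ih =>
      have hb : b ≤ b + m := by omega
      have hsplit : PySem.List.pyRange b (b + (m + 1 : Nat)) 1
          = PySem.List.pyRange b (b + m) 1 ++ [b + m] := by
        have := PySem.List.pyRange_one_succ_right (a := b) (b := b + m) hb
        have he : b + ((m : Int) + 1) = (b + m) + 1 := by ring
        push_cast
        rw [he, this]
      rw [hsplit]
      rw [List.reverse_append, List.foldl_append, List.foldl_append]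
      simp only [List.reverse_cons, List.reverse_nil, List.nil_append, List.foldl_cons,
        List.foldl_nil]
      rw [ih (a * 256 + v (b + m))]
      have ht : (b + (m : Int) - b).toNat = m := by omega
      rw [ht]
      ring

-- The Python slice data[b : b + bs] is the per-index view over range(b, min(b + bs, n)).
theorem slice_eq_map_range (data : List Int) (b bs : Int) (hbs : 0 < bs) (hb : 0 ≤ b)
    (hn : b ≤ (data.length : Int)) :
    PySem.List.slice data (some b) (some (b + bs))
      = (PySem.List.pyRange b (min (b + bs) (data.length : Int)) 1).map
          (fun i => PySem.List.pyGetD data i 0) := by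
  rw [PySem.List.slice_toNat data hb (by omega)]
  apply List.ext_getElem
  · rw [List.length_take, List.length_drop, List.length_map, PySem.List.length_pyRange_one]
    omega
  · intro k h1 h2
    have hk : k < ((min (b + bs) (data.length : Int)) - b).toNat := by
      rw [List.length_map, PySem.List.length_pyRange_one] at h2
      exact h2
    have hklen : b.toNat + k < data.length := by omega
    rw [List.getElem_map, PySem.List.getElem_pyRange_one]
    rw [List.getElem_take, List.getElem_drop]
    rw [PySem.List.pyGetD_eq_getElem data 0 (by omega) (by omega)]
    congr 1
    omega

-- The two block computations agree when the block start is a multiple of the (positive) block size.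
theorem inner_eq (data : List Int) (bs b : Int) (hbs : 0 < bs) (hb : bs ∣ b)
    (hbn : 0 ≤ b) (hn : b ≤ (data.length : Int)) :
    (PySem.List.pyRange b (min (b + bs) (data.length : Int)) 1).foldl
        (fun bi i => bi + (PySem.List.pyGetD data i 0) * (256 : Int) ^ (PySem.Int.mod i bs).toNat) 0
      = pvBlockValue (PySem.List.slice data (some b) (some (b + bs))) := by
  set e := min (b + bs) (data.length : Int) with he
  have hbe : b ≤ e := by omega
  -- the i % bs exponent is i - b on members of the range
  have hcong : (PySem.List.pyRange b e 1).foldl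
      (fun bi i => bi + (PySem.List.pyGetD data i 0) * (256 : Int) ^ (PySem.Int.mod i bs).toNat) 0
      = (PySem.List.pyRange b e 1).foldl
      (fun bi i => bi + (PySem.List.pyGetD data i 0) * (256 : Int) ^ (i - b).toNat) 0 := by
    apply PySem.List.foldl_congr_mem
    intro acc x hx
    rw [PySem.List.mem_pyRange_one] at hx
    have hmod : PySem.Int.mod x bs = x - b := by
      rw [PySem.Int.mod_eq_emod_of_pos hbs]
      have : x % bs = (x - b) % bs := by
        obtain ⟨k, hk⟩ := hb
        subst hk
        simp [Int.sub_emod, Int.mul_emod_right]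
      rw [this, Int.emod_eq_of_lt (by omega) (by omega)]
    rw [hmod]
  rw [hcong]
  rw [pvBlockValue, slice_eq_map_range data b bs hbs hbn hn, ← List.map_reverse,
    List.foldl_map, ← he]
  have hm : e = b + ((e - b).toNat : Int) := by omega
  rw [hm, horner_key (fun i => PySem.List.pyGetD data i 0) b (e - b).toNat 0]
  ring

-- ===== VERDICT (by name: the statement is the Claim_ definition above) =====
theorem get_blocks_from_text_spec : Claim_equal_get_blocks_from_text := by
  intro message bs _hdom hpre
  unfold Spec_get_blocks_from_text get_blocks_from_text get_blocks_from_text_alt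
  simp only []
  rcases lt_or_gt_of_ne hpre with hneg | hpos
  · rw [pyRange_zero_neg_step _ _ (by positivity) hneg]
    rfl
  · rw [PySem.List.foldl_append_singleton_eq_map]
    simp only [List.nil_append]
    apply List.map_congr_left
    intro b hb
    rw [PySem.List.mem_pyRange_iff_of_pos hpos] at hb
    exact inner_eq (pvBytes message) bs b hpos (by simpa using hb.2.2) hb.1 (le_of_lt hb.2.1)
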